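-- pv_equiv track=rewrite | github.com/captain204/Python-notes | exercises.py | segregate_twos
-- ===== SOURCE A (Python) =====
-- def segregate_twos(arr):
--     zero = []
--     ones = []
--     twos = []
--     for value in arr:
--         if value < 1:
--             zero.append(value)
--         elif value < 2:
--             ones.append(value)
--         else:
--             twos.append(value)
--     return zero + ones + twos
-- ===== SOURCE B (Python) =====
-- def segregate_twos(arr):
--     return sorted(arr, key=lambda v: 0 if v < 1 else (1 if v < 2 else 2))
-- ===== Notes on version B (the rewrite author's own statement) =====
-- stated objective: idiomatic
-- what changed: Replaces the three explicit bucket lists and the append loop by a single stable sorted() call whose key maps each value to its bucket index 0/1/2; stability preserves the within-bucket order.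
import Mathlib
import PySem

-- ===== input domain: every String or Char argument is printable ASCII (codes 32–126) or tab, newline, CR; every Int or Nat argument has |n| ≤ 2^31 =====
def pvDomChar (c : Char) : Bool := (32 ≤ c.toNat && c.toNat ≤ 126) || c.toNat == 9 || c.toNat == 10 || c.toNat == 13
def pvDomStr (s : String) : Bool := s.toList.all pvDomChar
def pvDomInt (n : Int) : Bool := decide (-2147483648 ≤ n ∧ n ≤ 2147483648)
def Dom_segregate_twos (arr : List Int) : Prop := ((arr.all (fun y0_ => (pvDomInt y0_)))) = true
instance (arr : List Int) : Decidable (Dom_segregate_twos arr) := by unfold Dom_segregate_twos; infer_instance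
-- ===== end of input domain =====

-- B replaces A's three explicit bucket lists and append loop by one stable sorted() call keyed by bucket index 0/1/2 (more idiomatic, same result).


-- ===== PORT A =====
-- literal port: three accumulator lists, appended to in one pass, then concatenated
def segregate_twos (arr : List Int) : List Int :=
  let st := arr.foldl (fun (s : List Int × List Int × List Int) value =>
    if value < 1 then (s.1 ++ [value], s.2.1, s.2.2)
    else if value < 2 then (s.1, s.2.1 ++ [value], s.2.2)
    else (s.1, s.2.1, s.2.2 ++ [value])) ([], [], [])
  st.1 ++ st.2.1 ++ st.2.2

-- ===== PORT B =====
-- B's key lambda: 0 if v < 1 else (1 if v < 2 else 2)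
def segKey (v : Int) : Int := if v < 1 then 0 else if v < 2 then 1 else 2

-- literal port of Source B: one stable sort by bucket index
def segregate_twos_alt (arr : List Int) : List Int :=
  PySem.List.sorted arr segKey false

-- ===== PRECONDITION & SPEC =====
def Spec_segregate_twos (arr : List Int) (out : List Int) : Prop := out = segregate_twos_alt arr
instance (arr : List Int) (out : List Int) : Decidable (Spec_segregate_twos arr out) := by unfold Spec_segregate_twos; infer_instance

-- ===== CLAIM (what is proved, stated in full; the proofs are below) =====
def Claim_equal_segregate_twos : Prop := ∀ (arr : List Int), Dom_segregate_twos arr → Spec_segregate_twos arr (segregate_twos arr)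

-- ===== LEMMAS AND PROOFS =====

-- the bucket filter: elements of arr whose bucket index is i, in order
def segF (i : Int) (arr : List Int) : List Int := arr.filter (fun v => segKey v == i)

theorem segF_append (i : Int) (xs ys : List Int) :
    segF i (xs ++ ys) = segF i xs ++ segF i ys := by
  simp [segF]

-- A's loop accumulates exactly the three bucket filters
theorem segA_loop (arr z o t : List Int) :
    arr.foldl (fun (s : List Int × List Int × List Int) value =>
      if value < 1 then (s.1 ++ [value], s.2.1, s.2.2)
      else if value < 2 then (s.1, s.2.1 ++ [value], s.2.2)
      else (s.1, s.2.1, s.2.2 ++ [value])) (z, o, t)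
    = (z ++ segF 0 arr, o ++ segF 1 arr, t ++ segF 2 arr) := by
  induction arr generalizing z o t with
  | nil => simp [segF]
  | cons v rest ih =>
    rw [List.foldl_cons]
    by_cases h1 : v < 1
    · rw [if_pos h1, ih]
      simp [segF, segKey, h1]
    · by_cases h2 : v < 2
      · rw [if_neg h1, if_pos h2, ih]
        simp [segF, List.filter_cons, segKey, h1]
        split_ifs <;> omega
      · rw [if_neg h1, if_neg h2, ih]
        simp [segF, List.filter_cons, segKey, h1]
        split_ifs <;> omega

theorem insertBy_not_before_append {α : Type} (before : α → α → Bool) (x : α) (l m : List α)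
    (h : ∀ y ∈ l, before x y = false) :
    PySem.List.insertBy before x (l ++ m) = l ++ PySem.List.insertBy before x m := by
  induction l with
  | nil => simp
  | cons a l ih =>
    have ha : before x a = false := h a (by simp)
    cases m with
    | nil =>
      simp [PySem.List.insertBy, ha]
      have := ih (fun y hy => h y (by simp [hy]))
      simpa [PySem.List.insertBy, ha] using this
    | cons b m' =>
      have := ih (fun y hy => h y (by simp [hy]))
      simp [PySem.List.insertBy, ha, this]

theorem insertBy_all_before {α : Type} (before : α → α → Bool) (x : α) (m : List α)
    (h : ∀ y ∈ m, before x y = true) :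
    PySem.List.insertBy before x m = x :: m := by
  cases m with
  | nil => simp [PySem.List.insertBy]
  | cons a m' => simp [PySem.List.insertBy, h a (by simp)]

theorem segKey_mem_segF (i : Int) (arr : List Int) (y : Int) (hy : y ∈ segF i arr) :
    segKey y = i := by
  simp [segF, List.mem_filter] at hy
  exact hy.2

theorem segKey_range (v : Int) : segKey v = 0 ∨ segKey v = 1 ∨ segKey v = 2 := by
  unfold segKey; split_ifs <;> simp

-- one insertion step: x goes to the end of its bucket
theorem insertBy_buckets (x : Int) (xs : List Int) :
    PySem.List.insertBy (fun a b => decide (segKey a < segKey b)) x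
      (segF 0 xs ++ segF 1 xs ++ segF 2 xs)
    = segF 0 (xs ++ [x]) ++ segF 1 (xs ++ [x]) ++ segF 2 (xs ++ [x]) := by
  have hf : ∀ j, segF j [x] = if segKey x = j then [x] else [] := by
    intro j
    by_cases h : segKey x = j
    · simp [segF, List.filter, h]
    · simp [segF, List.filter, beq_eq_false_iff_ne.mpr h, h]
  rcases segKey_range x with hk | hk | hk
  · -- key 0: x stays after bucket 0 (stability) and before buckets 1 and 2
    rw [List.append_assoc,
        insertBy_not_before_append (fun a b => decide (segKey a < segKey b)) x
          (segF 0 xs) (segF 1 xs ++ segF 2 xs)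
          (by intro y hy; simp [segKey_mem_segF 0 xs y hy, hk]),
        insertBy_all_before (fun a b => decide (segKey a < segKey b)) x
          (segF 1 xs ++ segF 2 xs)
          (by
            intro y hy
            rcases List.mem_append.mp hy with h1 | h2
            · simp [segKey_mem_segF 1 xs y h1, hk]
            · simp [segKey_mem_segF 2 xs y h2, hk])]
    simp [segF_append, hf, hk]
  · rw [List.append_assoc, ← List.append_assoc (segF 0 xs),
        insertBy_not_before_append (fun a b => decide (segKey a < segKey b)) x
          (segF 0 xs ++ segF 1 xs) (segF 2 xs)
          (by
            intro y hy
            rcases List.mem_append.mp hy with h1 | h2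
            · simp [segKey_mem_segF 0 xs y h1, hk]
            · simp [segKey_mem_segF 1 xs y h2, hk]),
        insertBy_all_before (fun a b => decide (segKey a < segKey b)) x
          (segF 2 xs)
          (by intro y hy; simp [segKey_mem_segF 2 xs y hy, hk])]
    simp [segF_append, hf, hk]
  · rw [show segF 0 xs ++ segF 1 xs ++ segF 2 xs
          = (segF 0 xs ++ segF 1 xs ++ segF 2 xs) ++ ([] : List Int) by simp,
        insertBy_not_before_append (fun a b => decide (segKey a < segKey b)) x
          (segF 0 xs ++ segF 1 xs ++ segF 2 xs) []
          (by
            intro y hy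
            have : segKey y = 0 ∨ segKey y = 1 ∨ segKey y = 2 := segKey_range y
            rcases this with h | h | h <;> simp [h, hk])]
    simp [PySem.List.insertBy, segF_append, hf, hk]

-- B's stable sort produces the three bucket filters concatenated
theorem segB_eq_buckets (arr : List Int) :
    segregate_twos_alt arr = segF 0 arr ++ segF 1 arr ++ segF 2 arr := by
  unfold segregate_twos_alt
  rw [PySem.List.sorted_eq_foldl_insertBy]
  induction arr using List.reverseRecOn with
  | nil => simp [segF]
  | append_singleton xs x ih =>
    rw [List.foldl_append, List.foldl_cons, List.foldl_nil, ih, insertBy_buckets]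

theorem segregate_twos_spec : Claim_equal_segregate_twos := by
  intro arr _
  unfold Spec_segregate_twos
  rw [segB_eq_buckets]
  unfold segregate_twos
  rw [segA_loop]
  simp
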